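-- pv_equiv track=rewrite | github.com/taihak94/NLP2019 | assignment2/hw2_3.py | find_illegal_sequences
-- ===== SOURCE A (Python) =====
-- def find_illegal_sequences (guess):
--     OIX, IXIY, BXIY = 0,0,0
--     for i in range(len(guess)-1):
--         curr, next = guess[i], guess[i+1]
--         if curr[0]=="O" and next[0]=="I":
--             OIX+=1
--         elif curr[0]=="I" and next[0]=="I" and curr[1:] != next[1:]:
--             IXIY+=1
--         elif curr[0]=="B" and next[0]=="I" and curr[1:] != next[1:]:
--             BXIY+=1
--     return {"O-IX": OIX, "IX-IY": IXIY, "BX-IY": BXIY}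
-- ===== SOURCE B (Python) =====
-- def find_illegal_sequences(guess):
--     # Stage 1: histogram of transition signatures (first chars + whether the
--     # entity tails match), one bucket per distinct signature.
--     hist = {}
--     for pair in zip(guess, guess[1:]):
--         sig = (pair[0][0], pair[1][0], pair[0][1:] == pair[1][1:])
--         hist[sig] = hist.get(sig, 0) + 1
--     # Stage 2: aggregate the (few) distinct signatures into the three categories.
--     counts = {"O-IX": 0, "IX-IY": 0, "BX-IY": 0}
--     for (a, b, same), k in hist.items():
--         if b == "I":
--             if a == "O":
--                 counts["O-IX"] += k
--             elif not same:
--                 if a == "I":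
--                     counts["IX-IY"] += k
--                 elif a == "B":
--                     counts["BX-IY"] += k
--     return counts
-- ===== Notes on version B (the rewrite author's own statement) =====
-- stated objective: alternative
-- what changed: A's fused indexed loop with an if/elif chain over three scalar counters is replaced by a two-stage algorithm: first build a histogram (dict) of distinct transition signatures (curr[0], next[0], tails-equal) over the consecutive pairs, then aggregate the few distinct signature buckets into the three categories in a second pass over the histogram.
-- outside the precondition, e.g. on find_illegal_sequences(['X', '']): A returns {'O-IX': 0, 'IX-IY': 0, 'BX-IY': 0}, B raises IndexError
import Mathlib
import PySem

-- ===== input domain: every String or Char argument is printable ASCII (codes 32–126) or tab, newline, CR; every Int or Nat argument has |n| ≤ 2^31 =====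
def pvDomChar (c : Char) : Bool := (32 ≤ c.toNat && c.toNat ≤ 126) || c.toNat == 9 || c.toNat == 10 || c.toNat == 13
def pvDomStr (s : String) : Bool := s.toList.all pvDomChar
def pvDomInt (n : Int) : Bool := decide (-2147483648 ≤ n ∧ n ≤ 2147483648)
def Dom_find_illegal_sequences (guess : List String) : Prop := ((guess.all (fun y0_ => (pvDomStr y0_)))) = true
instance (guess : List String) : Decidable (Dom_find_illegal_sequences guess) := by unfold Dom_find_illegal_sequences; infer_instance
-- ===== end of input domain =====

-- B replaces A's fused if/elif counting loop by a two-stage algorithm: a histogram (dict) of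
-- transition signatures over the consecutive pairs, then an aggregation pass over the distinct
-- signature buckets (alternative decomposition; same asymptotic cost).

-- shared transliterations of the Python tag tests: s[0] and s[1:]
def pvHead (s : String) : Option Char := PySem.Str.pyGet? s 0
def pvRest (s : String) : List Char := PySem.Chars.slice s.toList (some 1) none

-- ===== PORT A =====
-- A: one loop over i in range(len(guess)-1) with an if/elif chain on a triple of counters
def find_illegal_sequences (guess : List String) : List (String × Int) :=
  let st := (PySem.List.pyRange 0 ((guess.length : Int) - 1) 1).foldl
    (fun (st : Int × Int × Int) i =>
      let curr := PySem.List.pyGetD guess i ""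
      let next := PySem.List.pyGetD guess (i + 1) ""
      if (pvHead curr == some 'O') && (pvHead next == some 'I') then
        (st.1 + 1, st.2.1, st.2.2)
      else if (pvHead curr == some 'I') && (pvHead next == some 'I')
              && (pvRest curr != pvRest next) then
        (st.1, st.2.1 + 1, st.2.2)
      else if (pvHead curr == some 'B') && (pvHead next == some 'I')
              && (pvRest curr != pvRest next) then
        (st.1, st.2.1, st.2.2 + 1)
      else st)
    ((0, 0, 0) : Int × Int × Int)
  [("O-IX", st.1), ("IX-IY", st.2.1), ("BX-IY", st.2.2)]

-- ===== PORT B =====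
-- the signature (pair[0][0], pair[1][0], pair[0][1:] == pair[1][1:]); Python's 1-character
-- strings pair[0][0]/pair[1][0] are modelled as Chars (exact on the nonempty strings Pre_ admits;
-- the ' ' default stands in for the IndexError case, which Pre_ excludes)
def pvSig (p : String × String) : Char × Char × Bool :=
  ((PySem.Str.pyGet? p.1 0).getD ' ', (PySem.Str.pyGet? p.2 0).getD ' ',
   pvRest p.1 == pvRest p.2)

-- B's stage-2 loop body: dispatch one histogram bucket (signature, multiplicity) to the counters
def pvAgg (r : Int × Int × Int) (kv : (Char × Char × Bool) × Int) : Int × Int × Int :=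
  if kv.1.2.1 == 'I' then
    if kv.1.1 == 'O' then (r.1 + kv.2, r.2.1, r.2.2)
    else if !kv.1.2.2 then
      if kv.1.1 == 'I' then (r.1, r.2.1 + kv.2, r.2.2)
      else if kv.1.1 == 'B' then (r.1, r.2.1, r.2.2 + kv.2)
      else r
    else r
  else r

def find_illegal_sequences_alt (guess : List String) : List (String × Int) :=
  let pairs := guess.zip (PySem.List.slice guess (some 1) none)
  let hist := pairs.foldl
    (fun (d : PySem.Dict (Char × Char × Bool) Int) p =>
      d.insert (pvSig p) (d.getD (pvSig p) 0 + 1))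
    PySem.Dict.empty
  let res := hist.items.foldl pvAgg ((0, 0, 0) : Int × Int × Int)
  [("O-IX", res.1), ("IX-IY", res.2.1), ("BX-IY", res.2.2)]

-- ===== PRECONDITION & SPEC =====
-- Pre_ excludes lists of two or more tags containing an empty tag string: there Python's tag[0]
-- raises IndexError in B (and in A except where A's short-circuit happens to skip the empty tag).
def Pre_find_illegal_sequences (guess : List String) : Prop :=
  1 < guess.length → ∀ s ∈ guess, s ≠ ""
instance (guess : List String) : Decidable (Pre_find_illegal_sequences guess) := by
  unfold Pre_find_illegal_sequences; infer_instance

def pvWitness_find_illegal_sequences : List String := ["B-LOC", "I-ORG", "O", "I-ORG", "I"]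

def Spec_find_illegal_sequences (guess : List String) (out : List (String × Int)) : Prop := out = find_illegal_sequences_alt guess
instance (guess : List String) (out : List (String × Int)) : Decidable (Spec_find_illegal_sequences guess out) := by unfold Spec_find_illegal_sequences; infer_instance

-- ===== CLAIM (what is proved, stated in full; the proofs are below) =====
def Claim_equal_find_illegal_sequences : Prop := ∀ (guess : List String), Dom_find_illegal_sequences guess → Pre_find_illegal_sequences guess → Spec_find_illegal_sequences guess (find_illegal_sequences guess)

-- ===== LEMMAS AND PROOFS =====

-- ---- A-side: the indexed loop is a fold of a counting step over the consecutive pairs ----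

def pvOIX (p : String × String) : Bool :=
  (pvHead p.1 == some 'O') && (pvHead p.2 == some 'I')
def pvIXIY (p : String × String) : Bool :=
  (pvHead p.1 == some 'I') && (pvHead p.2 == some 'I') && (pvRest p.1 != pvRest p.2)
def pvBXIY (p : String × String) : Bool :=
  (pvHead p.1 == some 'B') && (pvHead p.2 == some 'I') && (pvRest p.1 != pvRest p.2)

-- A's step, written out for the fold lemmas
def pvStep (st : Int × Int × Int) (p : String × String) : Int × Int × Int :=
  if pvOIX p then (st.1 + 1, st.2.1, st.2.2)
  else if pvIXIY p then (st.1, st.2.1 + 1, st.2.2)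
  else if pvBXIY p then (st.1, st.2.1, st.2.2 + 1)
  else st

-- the three conditions are mutually exclusive (different first characters)
lemma pvStep_eq (st : Int × Int × Int) (p : String × String) :
    pvStep st p = (st.1 + (if pvOIX p then 1 else 0),
                   st.2.1 + (if pvIXIY p then 1 else 0),
                   st.2.2 + (if pvBXIY p then 1 else 0)) := by
  have hOI : pvOIX p = true → pvIXIY p = false := by
    simp only [pvOIX, pvIXIY, Bool.and_eq_true, Bool.and_eq_false_iff, beq_iff_eq]
    rintro ⟨h, -⟩; left; simp [h]
  have hOB : pvOIX p = true → pvBXIY p = false := by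
    simp only [pvOIX, pvBXIY, Bool.and_eq_true, Bool.and_eq_false_iff, beq_iff_eq]
    rintro ⟨h, -⟩; left; left; simp [h]
  have hIB : pvIXIY p = true → pvBXIY p = false := by
    simp only [pvIXIY, pvBXIY, Bool.and_eq_true, Bool.and_eq_false_iff, beq_iff_eq]
    rintro ⟨⟨h, -⟩, -⟩; left; left; simp [h]
  unfold pvStep
  cases hO : pvOIX p with
  | true => simp [hOI hO, hOB hO]
  | false =>
    cases hI : pvIXIY p with
    | true => simp [hIB hI]
    | false => cases hB : pvBXIY p <;> simp [*]

-- a fold of pvStep accumulates the three counts independently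
lemma pvFold_counts (l : List (String × String)) (a b c : Int) :
    l.foldl pvStep (a, b, c) =
      (a + (l.countP pvOIX : Int), b + (l.countP pvIXIY : Int), c + (l.countP pvBXIY : Int)) := by
  induction l generalizing a b c with
  | nil => simp
  | cons p t ih =>
    rw [List.foldl_cons, pvStep_eq, ih]
    simp only [List.countP_cons]
    cases hO : pvOIX p <;> cases hI : pvIXIY p <;> cases hB : pvBXIY p <;> simp <;> omega

-- shifting a Nat-cast index past a cons cell
lemma pvGetD_cons_succ (l : List String) (k : Nat) (x : String) :
    PySem.List.pyGetD (x :: l) ((k : Int) + 1) "" = PySem.List.pyGetD l (k : Int) "" := by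
  have h : ((k : Int) + 1) = ((k + 1 : Nat) : Int) := by push_cast; ring
  rw [h, PySem.List.pyGetD_natCast, PySem.List.pyGetD_natCast]
  simp

-- A's indexed loop over range(len-1) is the fold of pvStep over the consecutive pairs
lemma pvRange_fold_eq_zip (g : List String) (st : Int × Int × Int) :
    (PySem.List.pyRange 0 ((g.length : Int) - 1) 1).foldl
      (fun st i => pvStep st (PySem.List.pyGetD g i "", PySem.List.pyGetD g (i + 1) ""))
      st
    = (g.zip g.tail).foldl pvStep st := by
  induction g generalizing st with
  | nil => simp [PySem.List.pyRange_one_eq_nil]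
  | cons x t ih =>
    cases t with
    | nil => simp [PySem.List.pyRange_one_eq_nil]
    | cons y u =>
      have hlen : ((x :: y :: u).length : Int) - 1 = ((y :: u).length : Int) := by
        push_cast [List.length_cons]; ring
      rw [hlen, PySem.List.pyRange_one_cons (by push_cast [List.length_cons]; omega),
          List.foldl_cons]
      have h0 : PySem.List.pyGetD (x :: y :: u) 0 "" = x := PySem.List.pyGetD_zero_cons ..
      have h1 : PySem.List.pyGetD (x :: y :: u) (0 + 1) "" = y := by
        have := PySem.List.pyGetD_natCast (x :: y :: u) 1 ""
        simpa using this
      rw [h0, h1]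
      have hshift : PySem.List.pyRange (0 + 1) ((y :: u).length : Int) 1
          = (PySem.List.pyRange 0 (((y :: u).length : Int) - 1) 1).map (· + 1) := by
        rw [PySem.List.pyRange_one, PySem.List.pyRange_one, List.map_map]
        congr 1
        · funext k; simp [Function.comp]; ring
        · norm_num
      rw [hshift, List.foldl_map]
      have hbody : ∀ (s : Int × Int × Int) (i : Int),
          i ∈ PySem.List.pyRange 0 (((y :: u).length : Int) - 1) 1 →
          pvStep s (PySem.List.pyGetD (x :: y :: u) (i + 1) "",
                    PySem.List.pyGetD (x :: y :: u) (i + 1 + 1) "")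
          = pvStep s (PySem.List.pyGetD (y :: u) i "", PySem.List.pyGetD (y :: u) (i + 1) "") := by
        intro s i hi
        rw [PySem.List.mem_pyRange_one] at hi
        obtain ⟨k, rfl⟩ : ∃ k : Nat, (k : Int) = i := ⟨i.toNat, by omega⟩
        have hA : PySem.List.pyGetD (x :: y :: u) ((k : Int) + 1) ""
            = PySem.List.pyGetD (y :: u) (k : Int) "" := pvGetD_cons_succ ..
        have hB' : PySem.List.pyGetD (x :: y :: u) ((k : Int) + 1 + 1) ""
            = PySem.List.pyGetD (y :: u) ((k : Int) + 1) "" := by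
          have h2 : ((k : Int) + 1 + 1) = (((k + 1 : Nat)) : Int) + 1 := by push_cast; ring
          rw [h2, pvGetD_cons_succ]; norm_cast
        rw [hA, hB']
      rw [PySem.List.foldl_congr_mem _ _ _ _ hbody, ih]
      simp

-- ---- B-side: the histogram is a Counter; aggregation over buckets is a countP ----

-- the three signature categories B's stage 2 dispatches on
def pvQO (k : Char × Char × Bool) : Bool := (k.2.1 == 'I') && (k.1 == 'O')
def pvQI (k : Char × Char × Bool) : Bool := (k.2.1 == 'I') && !k.2.2 && (k.1 == 'I')
def pvQB (k : Char × Char × Bool) : Bool := (k.2.1 == 'I') && !k.2.2 && (k.1 == 'B')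

-- the weighted contribution of a bucket list under a category predicate
def pvS (q : (Char × Char × Bool) → Bool) (l : List ((Char × Char × Bool) × Int)) : Int :=
  (l.map (fun kv => if q kv.1 then kv.2 else 0)).sum

lemma pvAgg_eq (r : Int × Int × Int) (kv : (Char × Char × Bool) × Int) :
    pvAgg r kv = (r.1 + (if pvQO kv.1 then kv.2 else 0),
                  r.2.1 + (if pvQI kv.1 then kv.2 else 0),
                  r.2.2 + (if pvQB kv.1 then kv.2 else 0)) := by
  obtain ⟨⟨a, b, same⟩, k⟩ := kv
  simp only [pvAgg, pvQO, pvQI, pvQB]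
  by_cases hb : b = 'I' <;> by_cases ha : a = 'O' <;> by_cases hs : same = true <;>
    by_cases hi : a = 'I' <;> by_cases hB : a = 'B' <;> simp_all

lemma pvFold_agg (l : List ((Char × Char × Bool) × Int)) (a b c : Int) :
    l.foldl pvAgg (a, b, c) = (a + pvS pvQO l, b + pvS pvQI l, c + pvS pvQB l) := by
  induction l generalizing a b c with
  | nil => simp [pvS]
  | cons kv t ih =>
    rw [List.foldl_cons, pvAgg_eq, ih]
    simp only [pvS, List.map_cons, List.sum_cons, Prod.mk.injEq]
    refine ⟨by omega, by omega, by omega⟩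

lemma pvSum_map_add {α : Type} (f g : α → Int) (l : List α) :
    (l.map (fun x => f x + g x)).sum = (l.map f).sum + (l.map g).sum := by
  induction l with
  | nil => simp
  | cons x t ih => simp only [List.map_cons, List.sum_cons, ih]; ring

-- one delta bucket: over nodup keys containing x, only x's entry contributes
lemma pvDelta {K : Type} [BEq K] [LawfulBEq K] (q : K → Bool) (x : K) (ks : List K)
    (hnd : ks.Nodup) (hx : x ∈ ks) :
    (ks.map (fun k => if q k && (k == x) then (1 : Int) else 0)).sum = if q x then 1 else 0 := by
  induction ks with
  | nil => cases hx
  | cons y t ih =>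
    simp only [List.map_cons, List.sum_cons]
    rcases List.mem_cons.mp hx with rfl | hxt
    · have hnt : x ∉ t := (List.nodup_cons.mp hnd).1
      have hz : (t.map (fun k => if q k && (k == x) then (1 : Int) else 0)).sum = 0 := by
        apply List.sum_eq_zero
        intro v hv
        obtain ⟨k, hk, rfl⟩ := List.mem_map.mp hv
        have hne : (k == x) = false := by
          simp only [beq_eq_false_iff_ne]; rintro rfl; exact hnt hk
        simp [hne]
      rw [hz]; simp
    · have hyx : (y == x) = false := by
        simp only [beq_eq_false_iff_ne]; rintro rfl; exact (List.nodup_cons.mp hnd).1 hxt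
      rw [ih (List.nodup_cons.mp hnd).2 hxt]
      simp [hyx]

-- summing (count in sigs) over a nodup covering key list under q is countP q sigs
lemma pvCount_sum {K : Type} [BEq K] [LawfulBEq K] (q : K → Bool) (sigs ks : List K)
    (hnd : ks.Nodup) (hsub : ∀ y ∈ sigs, y ∈ ks) :
    (ks.map (fun k => if q k then (sigs.count k : Int) else 0)).sum = (sigs.countP q : Int) := by
  induction sigs with
  | nil => simp
  | cons x t ih =>
    have hx : x ∈ ks := hsub x (by simp)
    have hsub' : ∀ y ∈ t, y ∈ ks := fun y hy => hsub y (by simp [hy])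
    have hpt : (fun k => if q k then (((x :: t).count k : Nat) : Int) else 0)
        = fun k => (if q k then (t.count k : Int) else 0) + (if q k && (k == x) then 1 else 0) := by
      funext k
      rw [List.count_cons]
      cases hq : q k <;> cases hk : (k == x) <;> simp [hq, hk]
      · intro h; subst h; simp at hk
      · exact (beq_iff_eq.mp hk).symm
    rw [hpt, pvSum_map_add, ih hsub', pvDelta q x ks hnd hx]
    simp only [List.countP_cons]
    cases hq : q x <;> simp [hq]

-- the first character of a nonempty string: .getD comparison agrees with the option comparison
lemma pvHead_nonempty (s : String) (hs : s ≠ "") (ch : Char) :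
    (((PySem.Str.pyGet? s 0).getD ' ') == ch) = (pvHead s == some ch) := by
  have h0 : PySem.Str.pyGet? s 0 = s.toList[(0 : Nat)]? := by
    have := PySem.Str.pyGet?_natCast s 0
    simpa using this
  have hne : s.toList ≠ [] := by
    intro h
    apply hs
    have := congrArg String.ofList h
    simpa using this
  cases hl : s.toList with
  | nil => exact absurd hl hne
  | cons c cs =>
    unfold pvHead
    rw [h0, hl]
    simp

-- B's result, characterised as the three pair counts
lemma pvAlt_eq_countP (guess : List String)
    (hpre : Pre_find_illegal_sequences guess) :
    find_illegal_sequences_alt guess =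
      [("O-IX", ((guess.zip guess.tail).countP pvOIX : Int)),
       ("IX-IY", ((guess.zip guess.tail).countP pvIXIY : Int)),
       ("BX-IY", ((guess.zip guess.tail).countP pvBXIY : Int))] := by
  simp only [find_illegal_sequences_alt]
  rw [PySem.List.slice_from_one]
  have hhist : (guess.zip guess.tail).foldl
      (fun (d : PySem.Dict (Char × Char × Bool) Int) p =>
        d.insert (pvSig p) (d.getD (pvSig p) 0 + 1))
      PySem.Dict.empty
      = PySem.Dict.counter ((guess.zip guess.tail).map pvSig) := by
    rw [← PySem.Dict.foldl_insert_getD_add_one_eq_counter, List.foldl_map]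
  rw [hhist, PySem.Dict.items_counter, pvFold_agg]
  -- each weighted bucket sum is the corresponding countP over the pairs
  have hmem : ∀ p ∈ guess.zip guess.tail, p.1 ≠ "" ∧ p.2 ≠ "" := by
    intro p hp
    have h1 : p.1 ∈ guess := (List.of_mem_zip hp).1
    have h2 : p.2 ∈ guess.tail := (List.of_mem_zip hp).2
    have hlen : 1 < guess.length := by
      cases guess with
      | nil => cases h1
      | cons x t =>
        cases t with
        | nil => simp at h2
        | cons y u => simp
    exact ⟨hpre hlen p.1 h1, hpre hlen p.2 (List.mem_of_mem_tail h2)⟩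
  have hbridge : ∀ (q : (Char × Char × Bool) → Bool) (r : (String × String) → Bool),
      (∀ p ∈ guess.zip guess.tail, q (pvSig p) = r p) →
      pvS q ((PySem.Set.ofList ((guess.zip guess.tail).map pvSig)).map
        (fun k => (k, (((guess.zip guess.tail).map pvSig).count k : Int))))
      = ((guess.zip guess.tail).countP r : Int) := by
    intro q r hqr
    unfold pvS
    rw [List.map_map]
    have : ((fun kv : (Char × Char × Bool) × Int => if q kv.1 then kv.2 else 0) ∘
        (fun k => (k, (((guess.zip guess.tail).map pvSig).count k : Int))))
        = fun k => if q k then (((guess.zip guess.tail).map pvSig).count k : Int) else 0 := by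
      funext k; simp [Function.comp]
    rw [this, pvCount_sum q _ _ (PySem.Set.nodup_ofList _)
      (fun y hy => (PySem.Set.mem_ofList _ _).mpr hy)]
    rw [List.countP_map]
    exact congrArg _ (List.countP_congr (fun p hp => by simp [Function.comp, hqr p hp]))
  have hO : ∀ p ∈ guess.zip guess.tail, pvQO (pvSig p) = pvOIX p := by
    intro p hp
    obtain ⟨h1, h2⟩ := hmem p hp
    simp only [pvQO, pvSig, pvOIX]
    rw [pvHead_nonempty p.1 h1, pvHead_nonempty p.2 h2, Bool.and_comm]
  have hI : ∀ p ∈ guess.zip guess.tail, pvQI (pvSig p) = pvIXIY p := by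
    intro p hp
    obtain ⟨h1, h2⟩ := hmem p hp
    simp only [pvQI, pvSig, pvIXIY]
    rw [pvHead_nonempty p.1 h1, pvHead_nonempty p.2 h2]
    cases hc : (pvHead p.1 == some 'I') <;> cases hn : (pvHead p.2 == some 'I') <;>
      cases hr : (pvRest p.1 == pvRest p.2) <;> simp [bne, hr]
  have hB : ∀ p ∈ guess.zip guess.tail, pvQB (pvSig p) = pvBXIY p := by
    intro p hp
    obtain ⟨h1, h2⟩ := hmem p hp
    simp only [pvQB, pvSig, pvBXIY]
    rw [pvHead_nonempty p.1 h1, pvHead_nonempty p.2 h2]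
    cases hc : (pvHead p.1 == some 'B') <;> cases hn : (pvHead p.2 == some 'I') <;>
      cases hr : (pvRest p.1 == pvRest p.2) <;> simp [bne, hr]
  rw [hbridge pvQO pvOIX hO, hbridge pvQI pvIXIY hI, hbridge pvQB pvBXIY hB]
  simp

-- ===== VERDICT (by name: the statement is the Claim_ definition above) =====
theorem find_illegal_sequences_spec : Claim_equal_find_illegal_sequences := by
  intro guess _ hpre
  unfold Spec_find_illegal_sequences find_illegal_sequences
  rw [pvAlt_eq_countP guess hpre]
  rw [show (fun (st : Int × Int × Int) (i : Int) =>
        let curr := PySem.List.pyGetD guess i ""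
        let next := PySem.List.pyGetD guess (i + 1) ""
        if (pvHead curr == some 'O') && (pvHead next == some 'I') then
          (st.1 + 1, st.2.1, st.2.2)
        else if (pvHead curr == some 'I') && (pvHead next == some 'I')
                && (pvRest curr != pvRest next) then
          (st.1, st.2.1 + 1, st.2.2)
        else if (pvHead curr == some 'B') && (pvHead next == some 'I')
                && (pvRest curr != pvRest next) then
          (st.1, st.2.1, st.2.2 + 1)
        else st)
      = (fun st i => pvStep st (PySem.List.pyGetD guess i "", PySem.List.pyGetD guess (i + 1) ""))
      from by funext st i; simp [pvStep, pvOIX, pvIXIY, pvBXIY]]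
  rw [pvRange_fold_eq_zip, pvFold_counts]
  simp
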